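-- pv_equiv track=rewrite | github.com/tiendu/utility | nussinov.py | is_stem_loop
-- ===== SOURCE A (Python) =====
-- MIN_STEM_LENGTH = 12  # Minimum length for a stem
--
-- MIN_LOOP_LENGTH = 0  # Minimum length for a loop
--
-- def is_stem_loop(structure):
--     '''Check if a structure contains a stem-loop pattern.'''
--     in_stem = False
--     stem_length = 0
--     loop_length = 0
--
--     for char in structure:
--         if char == '(':
--             if not in_stem:
--                 in_stem = True
--                 stem_length = 1
--             else:
--                 stem_length += 1
--         elif char == '.':
--             if in_stem:
--                 if stem_length >= MIN_STEM_LENGTH and loop_length >= MIN_LOOP_LENGTH: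
--                     return True
--                 in_stem = False
--                 stem_length = 0
--                 loop_length = 0
--             else:
--                 loop_length += 1
--         else:  # Reset on non-stem, non-loop characters
--             in_stem = False
--             stem_length = 0
--             loop_length = 0
--
--     # Check at the end of the structure
--     if in_stem and stem_length >= MIN_STEM_LENGTH and loop_length >= MIN_LOOP_LENGTH:
--         return True
--
--     return False
-- ===== SOURCE B (Python) =====
-- def is_stem_loop(structure):
--     '''Check if a structure contains a stem-loop pattern.'''
--     n = len(structure)
--     i = 0
--     while i < n:
--         if structure[i] == '(':
--             j = i
--             while j < n and structure[j] == '(':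
--                 j += 1
--             if j - i >= 12 and (j == n or structure[j] == '.'):
--                 return True
--             i = j
--         else:
--             i += 1
--     return False
-- ===== Notes on version B (the rewrite author's own statement) =====
-- stated objective: alternative
-- what changed: Replaced A's per-character state machine (in_stem/stem_length/loop_length flags) by a run-based index scan: B jumps over each maximal run of stem characters with an inner index loop and decides by looking at the one character after the run; no state variables are carried.
import Mathlib
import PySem

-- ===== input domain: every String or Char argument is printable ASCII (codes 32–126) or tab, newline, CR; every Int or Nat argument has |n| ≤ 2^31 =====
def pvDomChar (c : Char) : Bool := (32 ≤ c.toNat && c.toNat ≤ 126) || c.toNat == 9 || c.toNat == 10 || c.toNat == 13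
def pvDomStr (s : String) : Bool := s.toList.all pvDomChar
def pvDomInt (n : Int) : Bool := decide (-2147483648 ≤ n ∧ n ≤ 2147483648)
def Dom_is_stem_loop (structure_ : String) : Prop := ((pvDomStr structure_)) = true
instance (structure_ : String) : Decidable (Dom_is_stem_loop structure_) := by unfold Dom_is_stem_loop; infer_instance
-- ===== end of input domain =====

-- B replaces A's per-character state machine by a run-based scan that jumps over each
-- maximal '(' run and inspects the following character (objective: alternative).


-- ===== PORT A =====
-- literal transliteration of A's for-loop with state (in_stem, stem_length, loop_length)
def is_stem_loop_go (cs : List Char) (in_stem : Bool) (stem_length : Int) (loop_length : Int) : Bool :=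
  match cs with
  | [] => in_stem && decide (stem_length ≥ 12) && decide (loop_length ≥ 0)
  | c :: rest =>
    if c = '(' then
      if !in_stem then is_stem_loop_go rest true 1 loop_length
      else is_stem_loop_go rest true (stem_length + 1) loop_length
    else if c = '.' then
      if in_stem then
        if stem_length ≥ 12 ∧ loop_length ≥ 0 then true
        else is_stem_loop_go rest false 0 0
      else is_stem_loop_go rest in_stem stem_length (loop_length + 1)
    else
      is_stem_loop_go rest false 0 0

def is_stem_loop (structure_ : String) : Bool :=
  is_stem_loop_go structure_.toList false 0 0

-- ===== PORT B =====
-- B's inner while loop: count the leading '(' run and return the remainder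
def skipParens (cs : List Char) : Int × List Char :=
  match cs with
  | [] => (0, [])
  | c :: rest =>
    if c = '(' then
      let (k, r) := skipParens rest
      (k + 1, r)
    else (0, c :: rest)

theorem skipParens_length_le (cs : List Char) : (skipParens cs).2.length ≤ cs.length := by
  induction cs with
  | nil => simp [skipParens]
  | cons c rest ih =>
    simp only [skipParens]
    split
    · simpa using Nat.le_succ_of_le ih
    · simp

-- B's outer while loop over indices, as structural recursion over the remaining characters
def is_stem_loop_alt_go (cs : List Char) : Bool :=
  match cs with
  | [] => false
  | c :: rest =>
    if c = '(' then
      if ((skipParens rest).1 + 1 ≥ 12 ∧ ((skipParens rest).2 = [] ∨ (skipParens rest).2.headD ' ' = '.')) then true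
      else is_stem_loop_alt_go (skipParens rest).2
    else is_stem_loop_alt_go rest
termination_by cs.length
decreasing_by
  · have := skipParens_length_le rest
    simp; omega
  · simp

def is_stem_loop_alt (structure_ : String) : Bool :=
  is_stem_loop_alt_go structure_.toList

-- ===== PRECONDITION & SPEC =====
def Spec_is_stem_loop (structure_ : String) (out : Bool) : Prop := out = is_stem_loop_alt structure_
instance (structure_ : String) (out : Bool) : Decidable (Spec_is_stem_loop structure_ out) := by unfold Spec_is_stem_loop; infer_instance

-- ===== CLAIM (what is proved, stated in full; the proofs are below) =====
def Claim_equal_is_stem_loop : Prop := ∀ (structure_ : String), Dom_is_stem_loop structure_ → Spec_is_stem_loop structure_ (is_stem_loop structure_)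

-- ===== LEMMAS AND PROOFS =====

theorem skipParens_cons_other (c : Char) (rest : List Char) (h : c ≠ '(') :
    skipParens (c :: rest) = (0, c :: rest) := by
  simp [skipParens, h]

-- the two loops agree; proved by strong induction on the length of the remaining characters,
-- with the in-stem state of A related to the pending '(' run of B
theorem go_agree : ∀ (n : Nat) (cs : List Char), cs.length ≤ n →
    (∀ lp : Int, 0 ≤ lp → is_stem_loop_go cs false 0 lp = is_stem_loop_alt_go cs) ∧
    (∀ s lp : Int, 1 ≤ s → 0 ≤ lp →
      is_stem_loop_go cs true s lp =
        (if (s + (skipParens cs).1 ≥ 12 ∧ ((skipParens cs).2 = [] ∨ (skipParens cs).2.headD ' ' = '.'))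
         then true else is_stem_loop_alt_go (skipParens cs).2)) := by
  intro n
  induction n with
  | zero =>
    intro cs hlen
    have hnil : cs = [] := List.eq_nil_of_length_eq_zero (Nat.le_zero.mp hlen)
    subst hnil
    constructor
    · intro lp _; simp [is_stem_loop_go, is_stem_loop_alt_go]
    · intro s lp _ hlp
      by_cases h12 : (12 : Int) ≤ s <;>
        simp [is_stem_loop_go, is_stem_loop_alt_go, skipParens, hlp, h12]
  | succ n ih =>
    intro cs hlen
    match cs with
    | [] =>
      constructor
      · intro lp _; simp [is_stem_loop_go, is_stem_loop_alt_go]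
      · intro s lp _ hlp
        by_cases h12 : (12 : Int) ≤ s <;>
          simp [is_stem_loop_go, is_stem_loop_alt_go, skipParens, hlp, h12]
    | c :: rest =>
      have hrest : rest.length ≤ n := by simpa using Nat.lt_succ_iff.mp (Nat.lt_of_lt_of_le (by simp) hlen)
      have ihrest := ih rest hrest
      constructor
      · -- not in stem
        intro lp hlp
        by_cases hp : c = '('
        · subst hp
          simp only [is_stem_loop_go, is_stem_loop_alt_go, reduceIte, Bool.not_false]
          rw [ihrest.2 1 lp (by omega) hlp]
          have h1 : (1 : Int) + (skipParens rest).1 = (skipParens rest).1 + 1 := by ring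
          rw [h1]
        · by_cases hd : c = '.'
          · subst hd
            simp only [is_stem_loop_go, is_stem_loop_alt_go, reduceIte, Bool.false_eq_true]
            exact ihrest.1 (lp + 1) (by omega)
          · simp only [is_stem_loop_go, is_stem_loop_alt_go, if_neg hp, if_neg hd]
            exact ihrest.1 0 (by omega)
      · -- in stem with pending run length s
        intro s lp hs hlp
        by_cases hp : c = '('
        · subst hp
          simp only [is_stem_loop_go, skipParens, reduceIte, Bool.not_true, Bool.false_eq_true]
          rw [ihrest.2 (s + 1) lp (by omega) hlp]
          have h1 : s + 1 + (skipParens rest).1 = s + ((skipParens rest).1 + 1) := by ring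
          rw [h1]
        · rw [skipParens_cons_other c rest hp]
          by_cases hd : c = '.'
          · subst hd
            have hgo : is_stem_loop_go ('.' :: rest) true s lp =
                if 12 ≤ s ∧ 0 ≤ lp then true else is_stem_loop_go rest false 0 0 := by
              simp [is_stem_loop_go]
            rw [hgo]
            by_cases h12 : (12 : Int) ≤ s
            · rw [if_pos ⟨h12, hlp⟩, if_pos ⟨by omega, Or.inr rfl⟩]
            · rw [if_neg (by rintro ⟨h1, -⟩; exact h12 h1),
                  if_neg (by rintro ⟨h1, -⟩; exact h12 (by omega))]
              have halt : is_stem_loop_alt_go ('.' :: rest) = is_stem_loop_alt_go rest := by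
                simp [is_stem_loop_alt_go]
              rw [halt]
              exact ihrest.1 0 (by omega)
          · simp only [is_stem_loop_go, if_neg hp, if_neg hd]
            rw [if_neg (by
              rintro ⟨-, h | h⟩
              · exact List.cons_ne_nil _ _ h
              · exact hd (by simpa using h))]
            have halt : is_stem_loop_alt_go (c :: rest) = is_stem_loop_alt_go rest := by
              simp only [is_stem_loop_alt_go, if_neg hp]
            rw [halt]
            exact ihrest.1 0 (by omega)

-- ===== VERDICT (by name: the statement is the Claim_ definition above) =====
theorem is_stem_loop_spec : Claim_equal_is_stem_loop := by
  intro structure_ _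
  unfold Spec_is_stem_loop is_stem_loop is_stem_loop_alt
  exact (go_agree structure_.toList.length structure_.toList (le_refl _)).1 0 (le_refl _)
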